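-- pv_equiv track=rewrite | github.com/schultz1138/BladeRunner-KOR | patch/pipeline_bundle/.ref/TransProcess/tools/pack/pack_mix.py | calculate_fold_hash
-- ===== SOURCE A (Python) =====
-- def calculate_fold_hash(filename: str) -> int:
--     name = filename.upper()
--     i = 0
--     h = 0
--     while i < len(name) and i < 12:
--         group_sum = 0
--         for _ in range(4):
--             group_sum >>= 8
--             if i < len(name):
--                 group_sum |= ord(name[i]) << 24
--                 i += 1
--             else:
--                 group_sum |= 0
--         h = ((h << 1) | ((h >> 31) & 1)) + group_sum
--     return h & 0xFFFFFFFF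
-- ===== SOURCE B (Python) =====
-- def calculate_fold_hash(filename: str) -> int:
--     # Separate padding from hashing: pad the first-12 character codes to a
--     # multiple of 4, then combine each 4-code group with plain shifts.
--     codes = [ord(c) for c in filename.upper()[:12]]
--     codes += [0] * (-len(codes) % 4)
--     h = 0
--     for g in range(0, len(codes), 4):
--         group = codes[g] | (codes[g + 1] << 8) | (codes[g + 2] << 16) | (codes[g + 3] << 24)
--         h = ((h << 1) | ((h >> 31) & 1)) + group
--     return h & 0xFFFFFFFF
-- ===== Notes on version B (the rewrite author's own statement) =====
-- stated objective: simpler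
-- what changed: B separates padding from hashing: it builds the zero-padded list of character codes of the uppercased first 12 chars once, then combines each 4-code group into one 32-bit word with plain shifts and a single uniform rotate-add pass, instead of A's per-character shift-register with bounds checks interleaved inside the loop.
import Mathlib
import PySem

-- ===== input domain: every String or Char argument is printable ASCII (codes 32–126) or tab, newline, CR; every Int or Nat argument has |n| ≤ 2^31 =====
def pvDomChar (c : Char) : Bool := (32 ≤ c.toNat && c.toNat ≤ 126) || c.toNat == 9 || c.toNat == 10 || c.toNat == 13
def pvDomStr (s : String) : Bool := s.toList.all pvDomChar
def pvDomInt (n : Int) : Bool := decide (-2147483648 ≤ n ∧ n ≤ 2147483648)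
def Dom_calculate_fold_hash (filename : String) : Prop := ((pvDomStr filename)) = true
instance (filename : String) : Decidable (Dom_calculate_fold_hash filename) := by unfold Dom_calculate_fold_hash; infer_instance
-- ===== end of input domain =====

-- B is a plainer decomposition of the same hash (pad the first-12 codes, then a uniform
-- pass over the three groups) — same cost, objective: simpler.

-- ===== PORT A =====
-- inner 'for _ in range(4)' body: state (group_sum, i)
def pvGroupStep (nm : List Char) (p : Int × Nat) (_ : Nat) : Int × Nat :=
  let gs := p.1 >>> (8 : Nat)
  if p.2 < nm.length then
    (PySem.Int.bor gs (((nm.getD p.2 default).toNat : Int) <<< (24 : Nat)), p.2 + 1)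
  else
    (PySem.Int.bor gs 0, p.2)

-- the while loop of A; 'fuel' only bounds the iteration count (i rises by at least 1
-- per iteration and the guard needs i < 12, so 12 units of fuel are never exhausted)
def pvLoopA (nm : List Char) (fuel : Nat) (i : Nat) (h : Int) : Int :=
  match fuel with
  | 0 => h
  | fuel + 1 =>
    if i < nm.length ∧ i < 12 then
      let s := (List.range 4).foldl (pvGroupStep nm) ((0 : Int), i)
      pvLoopA nm fuel s.2 (PySem.Int.bor (h <<< (1 : Nat)) (PySem.Int.band (h >>> (31 : Nat)) 1) + s.1)
    else h

def calculate_fold_hash (filename : String) : Int :=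
  PySem.Int.band (pvLoopA (PySem.Str.upper filename).toList 12 0 0) 0xFFFFFFFF

-- ===== PORT B =====
def calculate_fold_hash_alt (filename : String) : Int :=
  let codes : List Int := ((PySem.Str.upper filename).toList.take 12).map (fun c => ((c.toNat : Nat) : Int))
  let codes2 := codes ++ List.replicate (PySem.Int.mod (-(codes.length : Int)) 4).toNat (0 : Int)
  let h := (PySem.List.pyRange 0 (codes2.length : Int) 4).foldl (fun (h : Int) (g : Int) =>
    let group := PySem.Int.bor (PySem.Int.bor (PySem.Int.bor
        (PySem.List.pyGetD codes2 g 0)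
        ((PySem.List.pyGetD codes2 (g + 1) 0) <<< (8 : Nat)))
        ((PySem.List.pyGetD codes2 (g + 2) 0) <<< (16 : Nat)))
        ((PySem.List.pyGetD codes2 (g + 3) 0) <<< (24 : Nat))
    PySem.Int.bor (h <<< (1 : Nat)) (PySem.Int.band (h >>> (31 : Nat)) 1) + group) (0 : Int)
  PySem.Int.band h 0xFFFFFFFF

-- ===== PRECONDITION & SPEC =====
def Spec_calculate_fold_hash (filename : String) (out : Int) : Prop := out = calculate_fold_hash_alt filename
instance (filename : String) (out : Int) : Decidable (Spec_calculate_fold_hash filename out) := by unfold Spec_calculate_fold_hash; infer_instance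

-- ===== CLAIM (what is proved, stated in full; the proofs are below) =====
def Claim_equal_calculate_fold_hash : Prop := ∀ (filename : String), Dom_calculate_fold_hash filename → Spec_calculate_fold_hash filename (calculate_fold_hash filename)

-- ===== LEMMAS AND PROOFS =====
theorem pvBorZeroLeft (x : Int) : PySem.Int.bor 0 x = x := by
  rw [PySem.Int.bor_comm]; exact PySem.Int.bor_zero x

theorem pvSr24 (a : Nat) : (a <<< 24) >>> 8 = a <<< 16 := by
  simp [Nat.shiftLeft_eq, Nat.shiftRight_eq_div_pow]; omega

theorem pvSr16 (a : Nat) : (a <<< 16) >>> 8 = a <<< 8 := by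
  simp [Nat.shiftLeft_eq, Nat.shiftRight_eq_div_pow]; omega

theorem pvSr8 (a : Nat) : (a <<< 8) >>> 8 = a := by
  simp [Nat.shiftLeft_eq, Nat.shiftRight_eq_div_pow]

theorem pvCastShl (m k : Nat) : ((m : Int) <<< k) = ((m <<< k : Nat) : Int) := by simp
theorem pvCastShr (m k : Nat) : ((m : Int) >>> k) = ((m >>> k : Nat) : Int) := by simp

theorem pvMain (l : List Char) :
    PySem.Int.band (pvLoopA l 12 0 0) 0xFFFFFFFF =
    (let codes : List Int := (l.take 12).map (fun c => ((c.toNat : Nat) : Int))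
     let codes2 := codes ++ List.replicate (PySem.Int.mod (-(codes.length : Int)) 4).toNat (0 : Int)
     let h := (PySem.List.pyRange 0 (codes2.length : Int) 4).foldl (fun (h : Int) (g : Int) =>
       let group := PySem.Int.bor (PySem.Int.bor (PySem.Int.bor
           (PySem.List.pyGetD codes2 g 0)
           ((PySem.List.pyGetD codes2 (g + 1) 0) <<< (8 : Nat)))
           ((PySem.List.pyGetD codes2 (g + 2) 0) <<< (16 : Nat)))
           ((PySem.List.pyGetD codes2 (g + 3) 0) <<< (24 : Nat))
       PySem.Int.bor (h <<< (1 : Nat)) (PySem.Int.band (h >>> (31 : Nat)) 1) + group) (0 : Int)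
     PySem.Int.band h 0xFFFFFFFF) := by
  have hr : List.range 4 = [0,1,2,3] := rfl
  have hp0 : PySem.List.pyRange 0 0 4 = [] := by decide
  have hp1 : PySem.List.pyRange 0 4 4 = [0] := by decide
  have hp2 : PySem.List.pyRange 0 8 4 = [0, 4] := by decide
  have hp3 : PySem.List.pyRange 0 12 4 = [0, 4, 8] := by decide
  rcases l with _ | ⟨c0, l⟩
  · simp [pvLoopA, hp0]
  rcases l with _ | ⟨c1, l⟩
  · simp [pvLoopA, pvGroupStep, hr, List.foldl, hp1,
      PySem.List.pyGetD, PySem.List.pyGet?, PySem.List.pyIdx?, pvBorZeroLeft]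
    simp only [pvCastShl, pvCastShr, pvSr24, pvSr16, pvSr8]
  rcases l with _ | ⟨c2, l⟩
  · simp [pvLoopA, pvGroupStep, hr, List.foldl, hp1,
      PySem.List.pyGetD, PySem.List.pyGet?, PySem.List.pyIdx?, pvBorZeroLeft]
    simp only [pvCastShl, pvCastShr, PySem.Int.bor_natCast, Nat.shiftRight_or_distrib,
      pvSr24, pvSr16, pvSr8]
  rcases l with _ | ⟨c3, l⟩
  · simp [pvLoopA, pvGroupStep, hr, List.foldl, hp1,
      PySem.List.pyGetD, PySem.List.pyGet?, PySem.List.pyIdx?, pvBorZeroLeft]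
    simp only [pvCastShl, pvCastShr, PySem.Int.bor_natCast, Nat.shiftRight_or_distrib,
      pvSr24, pvSr16, pvSr8]
  rcases l with _ | ⟨c4, l⟩
  · simp [pvLoopA, pvGroupStep, hr, List.foldl, hp1,
      PySem.List.pyGetD, PySem.List.pyGet?, PySem.List.pyIdx?, pvBorZeroLeft]
    simp only [pvCastShl, pvCastShr, PySem.Int.bor_natCast, Nat.shiftRight_or_distrib,
      pvSr24, pvSr16, pvSr8]
  rcases l with _ | ⟨c5, l⟩
  · simp [pvLoopA, pvGroupStep, hr, List.foldl, hp2,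
      PySem.List.pyGetD, PySem.List.pyGet?, PySem.List.pyIdx?, pvBorZeroLeft]
    simp only [pvCastShl, pvCastShr, PySem.Int.bor_natCast, Nat.shiftRight_or_distrib,
      pvSr24, pvSr16, pvSr8]
  rcases l with _ | ⟨c6, l⟩
  · simp [pvLoopA, pvGroupStep, hr, List.foldl, hp2,
      PySem.List.pyGetD, PySem.List.pyGet?, PySem.List.pyIdx?, pvBorZeroLeft]
    simp only [pvCastShl, pvCastShr, PySem.Int.bor_natCast, Nat.shiftRight_or_distrib,
      pvSr24, pvSr16, pvSr8]
  rcases l with _ | ⟨c7, l⟩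
  · simp [pvLoopA, pvGroupStep, hr, List.foldl, hp2,
      PySem.List.pyGetD, PySem.List.pyGet?, PySem.List.pyIdx?, pvBorZeroLeft]
    simp only [pvCastShl, pvCastShr, PySem.Int.bor_natCast, Nat.shiftRight_or_distrib,
      pvSr24, pvSr16, pvSr8]
  rcases l with _ | ⟨c8, l⟩
  · simp [pvLoopA, pvGroupStep, hr, List.foldl, hp2,
      PySem.List.pyGetD, PySem.List.pyGet?, PySem.List.pyIdx?, pvBorZeroLeft]
    simp only [pvCastShl, pvCastShr, PySem.Int.bor_natCast, Nat.shiftRight_or_distrib,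
      pvSr24, pvSr16, pvSr8]
  rcases l with _ | ⟨c9, l⟩
  · simp [pvLoopA, pvGroupStep, hr, List.foldl, hp3,
      PySem.List.pyGetD, PySem.List.pyGet?, PySem.List.pyIdx?, pvBorZeroLeft]
    simp only [pvCastShl, pvCastShr, PySem.Int.bor_natCast, Nat.shiftRight_or_distrib,
      pvSr24, pvSr16, pvSr8]
  rcases l with _ | ⟨c10, l⟩
  · simp [pvLoopA, pvGroupStep, hr, List.foldl, hp3,
      PySem.List.pyGetD, PySem.List.pyGet?, PySem.List.pyIdx?, pvBorZeroLeft]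
    simp only [pvCastShl, pvCastShr, PySem.Int.bor_natCast, Nat.shiftRight_or_distrib,
      pvSr24, pvSr16, pvSr8]
  rcases l with _ | ⟨c11, l⟩
  · simp [pvLoopA, pvGroupStep, hr, List.foldl, hp3,
      PySem.List.pyGetD, PySem.List.pyGet?, PySem.List.pyIdx?, pvBorZeroLeft]
    simp only [pvCastShl, pvCastShr, PySem.Int.bor_natCast, Nat.shiftRight_or_distrib,
      pvSr24, pvSr16, pvSr8]
  rcases l with _ | ⟨c12, l⟩
  · simp [pvLoopA, pvGroupStep, hr, List.foldl, hp3,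
      PySem.List.pyGetD, PySem.List.pyGet?, PySem.List.pyIdx?, pvBorZeroLeft]
    simp only [pvCastShl, pvCastShr, PySem.Int.bor_natCast, Nat.shiftRight_or_distrib,
      pvSr24, pvSr16, pvSr8]
  simp [pvLoopA, pvGroupStep, hr, List.foldl, hp3,
      PySem.List.pyGetD, PySem.List.pyGet?, PySem.List.pyIdx?, pvBorZeroLeft]
  simp only [pvCastShl, pvCastShr, PySem.Int.bor_natCast, Nat.shiftRight_or_distrib,
      pvSr24, pvSr16, pvSr8]

-- ===== VERDICT (by name: the statement is the Claim_ definition above) =====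
theorem calculate_fold_hash_spec : Claim_equal_calculate_fold_hash := by
  intro filename _
  unfold Spec_calculate_fold_hash calculate_fold_hash calculate_fold_hash_alt
  exact pvMain (PySem.Str.upper filename).toList
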